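-- pv_equiv track=rewrite | github.com/windigerbus/unmanic | unmanic/libs/unplugins/pluginscli.py | _order_plugin_type_details
-- ===== SOURCE A (Python) =====
-- def _order_plugin_type_details(plugin_type_details_list):
--     runner_priority = [
--         "on_library_management_file_test",
--         "on_worker_process",
--         "on_postprocessor_file_movement",
--         "on_postprocessor_task_results",
--         "render_frontend_panel",
--         "render_plugin_api",
--     ]
--     priority_lookup = {runner: index for index, runner in enumerate(runner_priority)}
--     emit_priority = len(runner_priority)
--     fallback_priority = emit_priority + 1
--
--     def sort_key(details):
--         runner = details.get('runner') or ''
--         if runner.startswith('emit_'):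
--             return (emit_priority, runner)
--         if runner in priority_lookup:
--             return (priority_lookup[runner], runner)
--         # Any runner not in the priority list should always come last.
--         return (fallback_priority, runner)
--
--     return sorted(plugin_type_details_list, key=sort_key)
-- ===== SOURCE B (Python) =====
-- def _order_plugin_type_details(plugin_type_details_list):
--     priority_lookup = {
--         "on_library_management_file_test": 0,
--         "on_worker_process": 1,
--         "on_postprocessor_file_movement": 2,
--         "on_postprocessor_task_results": 3,
--         "render_frontend_panel": 4,
--         "render_plugin_api": 5,
--     }
--     emit_priority = 6
--     fallback_priority = 7
--
--     def runner_of(details):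
--         return details.get('runner') or ''
--
--     def priority_of(details):
--         runner = runner_of(details)
--         if runner.startswith('emit_'):
--             return emit_priority
--         return priority_lookup.get(runner, fallback_priority)
--
--     # bucket into the 8 fixed priority slots, sort each bucket by runner, concatenate
--     ordered = []
--     for priority in range(fallback_priority + 1):
--         bucket = [d for d in plugin_type_details_list if priority_of(d) == priority]
--         ordered.extend(sorted(bucket, key=runner_of))
--     return ordered
-- ===== Notes on version B (the rewrite author's own statement) =====
-- stated objective: alternative
-- what changed: Replaced the single sort with a composite (priority, runner) tuple key by bucketing: for each of the 8 fixed priority slots, filter that slot's items out of the input, sort the bucket by runner string alone, and concatenate the buckets in slot order (the priority lookup becomes a literal dict with .get).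
import Mathlib
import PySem

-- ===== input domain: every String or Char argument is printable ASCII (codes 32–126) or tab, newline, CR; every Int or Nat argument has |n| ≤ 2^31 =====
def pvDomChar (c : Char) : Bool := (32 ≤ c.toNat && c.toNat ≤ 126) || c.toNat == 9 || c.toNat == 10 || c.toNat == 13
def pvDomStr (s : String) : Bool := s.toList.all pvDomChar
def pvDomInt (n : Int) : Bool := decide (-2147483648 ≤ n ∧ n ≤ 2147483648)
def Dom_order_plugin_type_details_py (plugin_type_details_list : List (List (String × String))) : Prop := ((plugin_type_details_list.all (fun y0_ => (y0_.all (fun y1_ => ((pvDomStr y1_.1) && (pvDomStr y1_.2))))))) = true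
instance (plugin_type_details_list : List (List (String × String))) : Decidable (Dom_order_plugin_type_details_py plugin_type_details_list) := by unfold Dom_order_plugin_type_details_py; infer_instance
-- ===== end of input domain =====

-- B replaces A's single composite-(priority, runner)-key sort by bucketing: filter the input into the 8 fixed
-- priority slots, sort each bucket by runner alone, and concatenate: alternative decomposition, same cost.


-- ===== PORT A =====
def pyA_runner_priority : List String :=
  ["on_library_management_file_test",
   "on_worker_process",
   "on_postprocessor_file_movement",
   "on_postprocessor_task_results",
   "render_frontend_panel",
   "render_plugin_api"]

def pyA_priority_lookup : PySem.Dict String Int :=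
  (PySem.List.enumerate pyA_runner_priority 0).foldl (fun d p => d.insert p.2 p.1) PySem.Dict.empty

def pyA_emit_priority : Int := (pyA_runner_priority.length : Int)

def pyA_fallback_priority : Int := pyA_emit_priority + 1

def pyA_sort_key (details : List (String × String)) : Int × String :=
  let runner : String := ((PySem.Dict.ofList details).get? "runner").getD ""
  if PySem.Str.startswith runner "emit_" then (pyA_emit_priority, runner)
  else if pyA_priority_lookup.contains runner then
    ((pyA_priority_lookup.get? runner).getD 0, runner)   -- subscript guarded by `in`: get? is some here
  else (pyA_fallback_priority, runner)

def order_plugin_type_details_py (plugin_type_details_list : List (List (String × String))) : List (List (String × String)) :=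
  PySem.List.sorted2 plugin_type_details_list (fun d => (pyA_sort_key d).1) (fun d => (pyA_sort_key d).2)

-- ===== PORT B =====
def pyB_priority_lookup : PySem.Dict String Int :=
  PySem.Dict.ofList
    [("on_library_management_file_test", 0),
     ("on_worker_process", 1),
     ("on_postprocessor_file_movement", 2),
     ("on_postprocessor_task_results", 3),
     ("render_frontend_panel", 4),
     ("render_plugin_api", 5)]

def pyB_emit_priority : Int := 6

def pyB_fallback_priority : Int := 7

def pyB_runner_of (details : List (String × String)) : String :=
  ((PySem.Dict.ofList details).get? "runner").getD ""

def pyB_priority_of (details : List (String × String)) : Int :=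
  let runner := pyB_runner_of details
  if PySem.Str.startswith runner "emit_" then pyB_emit_priority
  else pyB_priority_lookup.getD runner pyB_fallback_priority

def order_plugin_type_details_py_alt (plugin_type_details_list : List (List (String × String))) : List (List (String × String)) :=
  (PySem.List.pyRange 0 (pyB_fallback_priority + 1) 1).foldl
    (fun ordered priority =>
      ordered ++ PySem.List.sorted
        (plugin_type_details_list.filter (fun d => pyB_priority_of d == priority))
        pyB_runner_of)
    []

-- ===== PRECONDITION & SPEC =====
def Spec_order_plugin_type_details_py (plugin_type_details_list : List (List (String × String))) (out : List (List (String × String))) : Prop := out = order_plugin_type_details_py_alt plugin_type_details_list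
instance (plugin_type_details_list : List (List (String × String))) (out : List (List (String × String))) : Decidable (Spec_order_plugin_type_details_py plugin_type_details_list out) := by unfold Spec_order_plugin_type_details_py; infer_instance

-- ===== CLAIM (what is proved, stated in full; the proofs are below) =====
def Claim_equal_order_plugin_type_details_py : Prop := ∀ (plugin_type_details_list : List (List (String × String))), Dom_order_plugin_type_details_py plugin_type_details_list → Spec_order_plugin_type_details_py plugin_type_details_list (order_plugin_type_details_py plugin_type_details_list)

-- ===== LEMMAS AND PROOFS =====

-- the insertion-sort fold both PySem.List.sorted and PySem.List.sorted2 reduce to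
def sortedFold {α : Type} (lt : α → α → Bool) (xs : List α) : List α :=
  xs.foldl (fun acc x => PySem.List.insertBy lt x acc) []

-- the composite comparison sorted2 uses
def lex12 {α : Type} (lt1 lt2 : α → α → Bool) : α → α → Bool :=
  fun a b => lt1 a b || (!lt1 b a && lt2 a b)

theorem insertBy_cons {α : Type} (before : α → α → Bool) (x y : α) (ys : List α) :
    PySem.List.insertBy before x (y :: ys) =
      if before x y then x :: y :: ys else y :: PySem.List.insertBy before x ys := rfl

theorem mem_foldl_insertBy {α : Type} (lt : α → α → Bool) (xs : List α) (acc : List α) (y : α)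
    (h : y ∈ xs.foldl (fun acc x => PySem.List.insertBy lt x acc) acc) : y ∈ acc ∨ y ∈ xs := by
  induction xs generalizing acc with
  | nil => exact Or.inl h
  | cons x xs ih =>
    rcases ih _ h with h' | h'
    · rcases (PySem.List.mem_insertBy lt x y acc).mp h' with h'' | h''
      · exact Or.inr (by simp [h''])
      · exact Or.inl h''
    · exact Or.inr (List.mem_cons_of_mem _ h')

theorem mem_sortedFold {α : Type} (lt : α → α → Bool) (xs : List α) (y : α)
    (h : y ∈ sortedFold lt xs) : y ∈ xs := by
  rcases mem_foldl_insertBy lt xs [] y h with h' | h'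
  · cases h'
  · exact h'

theorem sortedFold_append_singleton {α : Type} (lt : α → α → Bool) (xs : List α) (x : α) :
    sortedFold lt (xs ++ [x]) = PySem.List.insertBy lt x (sortedFold lt xs) := by
  simp [sortedFold, List.foldl_append]

-- x skips a block whose elements all compare below it
theorem insertBy_skip {α : Type} (lt : α → α → Bool) (x : α) (A C : List α)
    (h : ∀ a ∈ A, lt x a = false) :
    PySem.List.insertBy lt x (A ++ C) = A ++ PySem.List.insertBy lt x C := by
  induction A with
  | nil => rfl
  | cons a A ih =>
    have ha : lt x a = false := h a (by simp)
    simp only [List.cons_append, insertBy_cons, ha, Bool.false_eq_true, if_false]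
    rw [ih (fun b hb => h b (by simp [hb]))]

-- x lands inside A (compared by lt', which agrees with lt there) when everything in C is above it
theorem insertBy_front {α : Type} (lt lt' : α → α → Bool) (x : α) (A C : List α)
    (hA : ∀ a ∈ A, lt x a = lt' x a) (hC : ∀ c ∈ C, lt x c = true) :
    PySem.List.insertBy lt x (A ++ C) = PySem.List.insertBy lt' x A ++ C := by
  induction A with
  | nil =>
    cases C with
    | nil => rfl
    | cons c cs =>
      simp only [List.nil_append, insertBy_cons, hC c (by simp), if_true]
      rfl
  | cons a A ih =>
    have ha : lt x a = lt' x a := hA a (by simp)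
    by_cases h1 : lt' x a = true
    · simp only [List.cons_append, insertBy_cons, ha, h1, if_true]
    · simp only [Bool.not_eq_true] at h1
      simp only [List.cons_append, insertBy_cons, ha, h1, Bool.false_eq_true, if_false]
      rw [ih (fun b hb => hA b (by simp [hb]))]

theorem flatMap_congr_mem {α β : Type} (ps : List α) (f g : α → List β)
    (h : ∀ p ∈ ps, f p = g p) : ps.flatMap f = ps.flatMap g := by
  induction ps with
  | nil => rfl
  | cons p ps ih =>
    simp only [List.flatMap_cons, h p (by simp), ih (fun q hq => h q (by simp [hq]))]

-- evaluations of the composite comparison by the primary keys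
theorem lex12_of_key_lt {α : Type} (key : α → Int) (lt2 : α → α → Bool) (x y : α)
    (h : key x < key y) :
    lex12 (fun a b => decide (key a < key b)) lt2 x y = true := by
  simp [lex12, h]

theorem lex12_of_key_gt {α : Type} (key : α → Int) (lt2 : α → α → Bool) (x y : α)
    (h : key y < key x) :
    lex12 (fun a b => decide (key a < key b)) lt2 x y = false := by
  simp [lex12, h, not_lt_of_gt h]

theorem lex12_of_key_eq {α : Type} (key : α → Int) (lt2 : α → α → Bool) (x y : α)
    (h : key x = key y) :
    lex12 (fun a b => decide (key a < key b)) lt2 x y = lt2 x y := by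
  simp [lex12, h]

-- inserting x by the composite key into the concatenated buckets inserts it (by lt2) into its own bucket
theorem insertBy_lex_flatMap {α : Type} (key : α → Int) (lt2 : α → α → Bool)
    (ps : List Int) (hps : ps.Pairwise (· < ·))
    (b : Int → List α) (hb : ∀ p ∈ ps, ∀ y ∈ b p, key y = p)
    (x : α) (hx : key x ∈ ps) :
    PySem.List.insertBy (lex12 (fun a b => decide (key a < key b)) lt2) x (ps.flatMap b) =
      ps.flatMap (fun p => if p = key x then PySem.List.insertBy lt2 x (b p) else b p) := by
  induction ps with
  | nil => cases hx
  | cons p ps ih =>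
    rcases List.pairwise_cons.mp hps with ⟨hplt, hps'⟩
    simp only [List.flatMap_cons]
    by_cases hpx : p = key x
    · -- x's own bucket: insert here, the rest (strictly larger keys) is untouched
      have hA : ∀ a ∈ b p, lex12 (fun a b => decide (key a < key b)) lt2 x a = lt2 x a := by
        intro a ha
        exact lex12_of_key_eq key lt2 x a (by rw [hb p (by simp) a ha, hpx])
      have hC : ∀ c ∈ ps.flatMap b, lex12 (fun a b => decide (key a < key b)) lt2 x c = true := by
        intro c hc
        rcases List.mem_flatMap.mp hc with ⟨q, hq, hcq⟩
        refine lex12_of_key_lt key lt2 x c ?_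
        rw [hb q (by simp [hq]) c hcq, ← hpx]
        exact hplt q hq
      rw [insertBy_front _ _ x _ _ hA hC, if_pos hpx]
      congr 1
      refine (flatMap_congr_mem ps _ _ ?_).symm
      intro q hq
      have : q ≠ key x := by rw [← hpx]; exact ne_of_gt (hplt q hq)
      rw [if_neg this]
    · -- p < key x: skip this bucket
      have hxps : key x ∈ ps := by
        rcases List.mem_cons.mp hx with h | h
        · exact absurd h.symm hpx
        · exact h
      have hA : ∀ a ∈ b p, lex12 (fun a b => decide (key a < key b)) lt2 x a = false := by
        intro a ha
        refine lex12_of_key_gt key lt2 x a ?_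
        rw [hb p (by simp) a ha]
        exact hplt _ hxps
      rw [insertBy_skip _ x _ _ hA, if_neg hpx]
      rw [ih hps' (fun q hq y hy => hb q (by simp [hq]) y hy) hxps]

-- MAIN: one sort by the composite key equals bucket-filter, per-bucket sort by lt2, concatenation
theorem sortedFold_lex_eq_flatMap {α : Type} (key : α → Int) (lt2 : α → α → Bool)
    (ps : List Int) (hps : ps.Pairwise (· < ·))
    (l : List α) (hl : ∀ x ∈ l, key x ∈ ps) :
    sortedFold (lex12 (fun a b => decide (key a < key b)) lt2) l =
      ps.flatMap (fun p => sortedFold lt2 (l.filter (fun d => key d == p))) := by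
  induction l using List.reverseRecOn with
  | nil => simp [sortedFold]
  | append_singleton l x ih =>
    rw [sortedFold_append_singleton,
        ih (fun y hy => hl y (by simp [hy]))]
    rw [insertBy_lex_flatMap key lt2 ps hps _
        (fun p _ y hy => by
          have := List.mem_filter.mp (mem_sortedFold lt2 _ y hy)
          exact eq_of_beq this.2)
        x (hl x (by simp))]
    refine (flatMap_congr_mem ps _ _ ?_).symm
    intro p _
    by_cases hpx : p = key x
    · have : (fun d => key d == p) x = true := by simp [hpx]
      rw [List.filter_append, List.filter_cons, if_pos this, List.filter_nil,
          sortedFold_append_singleton, if_pos hpx]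
    · have : (fun d => key d == p) x = false := by simp; exact fun h => hpx h.symm
      rw [List.filter_append, List.filter_cons, if_neg (by simp [this]), List.filter_nil,
          List.append_nil, if_neg hpx]

-- the two ports use pointwise-equal key functions
theorem runner_eq (d : List (String × String)) : pyB_runner_of d = (pyA_sort_key d).2 := by
  unfold pyB_runner_of pyA_sort_key
  dsimp only
  split_ifs <;> rfl

theorem priority_eq (d : List (String × String)) : pyB_priority_of d = (pyA_sort_key d).1 := by
  unfold pyB_priority_of pyA_sort_key pyB_runner_of
  dsimp only
  set runner := ((PySem.Dict.ofList d).get? "runner").getD "" with hr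
  have hlk : pyB_priority_lookup = pyA_priority_lookup := by decide
  have hemit : pyB_emit_priority = pyA_emit_priority := by decide
  have hfall : pyB_fallback_priority = pyA_fallback_priority := by decide
  rw [hlk, hemit, hfall]
  by_cases he : PySem.Str.startswith runner "emit_" = true
  · rw [if_pos he, if_pos he]
  · rw [if_neg he, if_neg he]
    by_cases hc : pyA_priority_lookup.contains runner = true
    · rw [if_pos hc]
      have hsome : (pyA_priority_lookup.get? runner).isSome = true := by
        rw [← PySem.Dict.contains_eq_isSome_get?]; exact hc
      obtain ⟨v, hv⟩ := Option.isSome_iff_exists.mp hsome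
      rw [PySem.Dict.getD_eq_get?_getD, hv]
      rfl
    · rw [if_neg hc]
      rw [PySem.Dict.getD_of_not_contains _ _ (by simpa using hc)]

-- every priority B computes lies in the 8 slots B iterates over
theorem priority_mem (d : List (String × String)) :
    0 ≤ pyB_priority_of d ∧ pyB_priority_of d < 8 := by
  unfold pyB_priority_of
  dsimp only
  set runner := pyB_runner_of d with hr
  by_cases he : PySem.Str.startswith runner "emit_" = true
  · rw [if_pos he]; decide
  · rw [if_neg he, PySem.Dict.getD_eq_get?_getD]
    rcases hv : pyB_priority_lookup.get? runner with _ | v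
    · decide
    · have hm := PySem.Dict.mem_items_of_get?_eq_some _ hv
      have hitems : pyB_priority_lookup.items =
          [("on_library_management_file_test", 0),
           ("on_worker_process", 1),
           ("on_postprocessor_file_movement", 2),
           ("on_postprocessor_task_results", 3),
           ("render_frontend_panel", 4),
           ("render_plugin_api", 5)] := rfl
      rw [hitems] at hm
      simp only [List.mem_cons, List.not_mem_nil, or_false, Prod.mk.injEq] at hm
      simp only [Option.getD_some]
      rcases hm with ⟨_, rfl⟩ | ⟨_, rfl⟩ | ⟨_, rfl⟩ | ⟨_, rfl⟩ | ⟨_, rfl⟩ | ⟨_, rfl⟩ <;> omega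

-- ===== VERDICT (by name: the statement is the Claim_ definition above) =====
theorem order_plugin_type_details_py_spec : Claim_equal_order_plugin_type_details_py := by
  intro l _
  unfold Spec_order_plugin_type_details_py
  unfold order_plugin_type_details_py order_plugin_type_details_py_alt
  rw [PySem.List.foldl_append_eq_flatMap]
  rw [List.nil_append]
  have hA : PySem.List.sorted2 l (fun d => (pyA_sort_key d).1) (fun d => (pyA_sort_key d).2) =
      sortedFold (lex12 (fun a b => decide ((pyA_sort_key a).1 < (pyA_sort_key b).1))
        (fun a b => decide ((pyA_sort_key a).2 < (pyA_sort_key b).2))) l := rfl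
  rw [hA]
  simp only [← priority_eq, ← runner_eq]
  have hps : (PySem.List.pyRange 0 (pyB_fallback_priority + 1) 1).Pairwise (· < ·) :=
    PySem.List.pairwise_lt_pyRange_one 0 _
  have hl : ∀ x ∈ l, pyB_priority_of x ∈ PySem.List.pyRange 0 (pyB_fallback_priority + 1) 1 := by
    intro x _
    rw [PySem.List.mem_pyRange_one]
    have := priority_mem x
    unfold pyB_fallback_priority
    omega
  rw [sortedFold_lex_eq_flatMap pyB_priority_of _ _ hps l hl]
  refine flatMap_congr_mem _ _ _ ?_
  intro p _
  exact (PySem.List.sorted_eq_foldl_insertBy _ _).symm
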